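-- pv_equiv track=rewrite | github.com/paulklemstine/factor | lean/demo/DivisionAlgebraNorms/research_output/demo_factoring_collisions.py | count_signed_representations
-- ===== SOURCE A (Python) =====
-- import math
--
-- def count_signed_representations(N: int) -> int:
--     """Count all representations N = a² + b² including signs and order."""
--     count = 0
--     for a in range(-int(math.isqrt(N)), int(math.isqrt(N)) + 1):
--         b_sq = N - a * a
--         if b_sq < 0:
--             continue
--         b = int(math.isqrt(b_sq))
--         if b * b == b_sq:
--             count += 1 if b == 0 else 2  # ±b
--     return count
-- ===== SOURCE B (Python) =====
-- import math
--
-- def count_signed_representations(N: int) -> int: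
--     """Count all representations N = a² + b² including signs and order."""
--     a, b = 0, math.isqrt(N)
--     count = 0
--     while a <= b:
--         s = a * a + b * b
--         if s == N:
--             w = (1 if a == 0 else 2) * (1 if b == 0 else 2)
--             count += w if a == b else 2 * w
--             a += 1
--             b -= 1
--         elif s < N:
--             a += 1
--         else:
--             b -= 1
--     return count
-- ===== Notes on version B (the rewrite author's own statement) =====
-- stated objective: alternative
-- what changed: A scans every signed value a in [-isqrt(N), isqrt(N)] and calls isqrt on N-a*a at each step to test for a perfect square; B instead runs a two-pointer sweep (a ascending, b descending from isqrt(N)) over unordered pairs a<=b, computing isqrt only once and weighting each hit by its number of sign/order variants.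
import Mathlib
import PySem

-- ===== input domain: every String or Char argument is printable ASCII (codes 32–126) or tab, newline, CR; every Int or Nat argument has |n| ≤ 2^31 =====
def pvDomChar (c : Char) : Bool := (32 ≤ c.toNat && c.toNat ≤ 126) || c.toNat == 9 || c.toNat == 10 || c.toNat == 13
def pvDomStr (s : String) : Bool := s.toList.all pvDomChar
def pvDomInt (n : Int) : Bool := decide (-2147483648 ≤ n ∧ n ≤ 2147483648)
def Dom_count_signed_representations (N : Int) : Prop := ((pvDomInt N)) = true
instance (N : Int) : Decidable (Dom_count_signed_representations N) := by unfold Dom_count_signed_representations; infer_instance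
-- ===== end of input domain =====

-- B replaces A's scan over every signed a (with an isqrt per step) by a two-pointer sweep
-- over unordered pairs a ≤ b with sign/order weights (a different algorithm of the same cost).

-- ===== PORT A =====
-- math.isqrt(n) for n ≥ 0 is ported exactly as Nat.sqrt n.toNat (floor square root);
-- math.isqrt raises ValueError for n < 0, excluded by Pre_ below.
def count_signed_representations (N : Int) : Int :=
  (PySem.List.pyRange (-(Nat.sqrt N.toNat : Int)) ((Nat.sqrt N.toNat : Int) + 1) 1).foldl
    (fun count a =>
      let b_sq := N - a * a
      if b_sq < 0 then count
      else
        let b : Int := (Nat.sqrt b_sq.toNat : Int)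
        if b * b = b_sq then count + (if b = 0 then 1 else 2) else count)
    0

-- ===== PORT B =====
-- the while loop of Source B: a ascends, b descends, pairs a ≤ b with a²+b²=N are weighted
def csrLoop (N a b count : Int) : Int :=
  if h : a ≤ b then
    if a * a + b * b = N then
      csrLoop N (a + 1) (b - 1)
        (count + (if a = b then (if a = 0 then (1 : Int) else 2) * (if b = 0 then 1 else 2)
                  else 2 * ((if a = 0 then (1 : Int) else 2) * (if b = 0 then 1 else 2))))
    else if a * a + b * b < N then csrLoop N (a + 1) b count
    else csrLoop N a (b - 1) count
  else count
termination_by (b + 1 - a).toNat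
decreasing_by all_goals omega

def count_signed_representations_alt (N : Int) : Int :=
  csrLoop N 0 (Nat.sqrt N.toNat : Int) 0

-- ===== PRECONDITION & SPEC =====
-- Pre_ excludes exactly N < 0, where Python's math.isqrt raises ValueError in both A and B.
def Pre_count_signed_representations (N : Int) : Prop := 0 ≤ N
instance (N : Int) : Decidable (Pre_count_signed_representations N) := by
  unfold Pre_count_signed_representations; infer_instance
def pvWitness_count_signed_representations : Int := 25

def Spec_count_signed_representations (N : Int) (out : Int) : Prop := out = count_signed_representations_alt N
instance (N : Int) (out : Int) : Decidable (Spec_count_signed_representations N out) := by unfold Spec_count_signed_representations; infer_instance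

-- ===== CLAIM (what is proved, stated in full; the proofs are below) =====
def Claim_equal_count_signed_representations : Prop := ∀ (N : Int), Dom_count_signed_representations N → Pre_count_signed_representations N → Spec_count_signed_representations N (count_signed_representations N)

-- ===== LEMMAS AND PROOFS =====

-- weight of the pair (x, y) in r₂(N): contribution of all sign choices
def pvPt (N x y : Int) : Int :=
  if x * x + y * y = N then (if x = 0 then 1 else 2) * (if y = 0 then 1 else 2) else 0

-- weighted count of unordered pairs a ≤ x ≤ y ≤ b with x² + y² = N
noncomputable def pvW (N a b : Int) : Int :=
  ∑ x ∈ Finset.Icc a b, ∑ y ∈ Finset.Icc x b, (if x = y then 1 else 2) * pvPt N x y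

lemma pvPt_symm (N x y : Int) : pvPt N x y = pvPt N y x := by
  unfold pvPt
  rw [show y * y + x * x = x * x + y * y from by ring]
  split_ifs <;> ring

lemma sum_Icc_left {f : Int → Int} {a b : Int} (h : a ≤ b) :
    ∑ x ∈ Finset.Icc a b, f x = f a + ∑ x ∈ Finset.Icc (a + 1) b, f x := by
  rw [← Finset.insert_Icc_add_one_left_eq_Icc h, Finset.sum_insert (by simp)]

lemma sum_Icc_right {f : Int → Int} {a b : Int} (h : a ≤ b) :
    ∑ x ∈ Finset.Icc a b, f x = (∑ x ∈ Finset.Icc a (b - 1), f x) + f b := by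
  rw [← Finset.insert_Icc_sub_one_right_eq_Icc h, Finset.sum_insert (by simp), add_comm]

lemma pvW_empty {N a b : Int} (h : b < a) : pvW N a b = 0 := by
  unfold pvW
  rw [Finset.Icc_eq_empty (by omega), Finset.sum_empty]

lemma pvW_lt {N a b : Int} (h0 : 0 ≤ a) (hab : a ≤ b) (hs : a * a + b * b < N) :
    pvW N a b = pvW N (a + 1) b := by
  unfold pvW
  rw [sum_Icc_left hab]
  have h1 : ∑ y ∈ Finset.Icc a b, (if a = y then 1 else 2) * pvPt N a y = 0 := by
    apply Finset.sum_eq_zero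
    intro y hy
    rw [Finset.mem_Icc] at hy
    have hyb : y * y ≤ b * b := mul_le_mul hy.2 hy.2 (by omega) (by omega)
    have hpt : pvPt N a y = 0 := by
      unfold pvPt
      rw [if_neg (by intro hEq; linarith)]
    rw [hpt, mul_zero]
  rw [h1, zero_add]

lemma pvW_gt {N a b : Int} (h0 : 0 ≤ a) (hab : a ≤ b) (hs : N < a * a + b * b) :
    pvW N a b = pvW N a (b - 1) := by
  unfold pvW
  have step1 : ∀ x ∈ Finset.Icc a b,
      ∑ y ∈ Finset.Icc x b, (if x = y then 1 else 2) * pvPt N x y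
        = ∑ y ∈ Finset.Icc x (b - 1), (if x = y then 1 else 2) * pvPt N x y := by
    intro x hx
    rw [Finset.mem_Icc] at hx
    rw [sum_Icc_right hx.2]
    have hpt : pvPt N x b = 0 := by
      unfold pvPt
      have hxx : a * a ≤ x * x := mul_le_mul hx.1 hx.1 h0 (by omega)
      rw [if_neg (by intro hEq; linarith)]
    rw [hpt, mul_zero, add_zero]
  rw [Finset.sum_congr rfl step1, sum_Icc_right hab]
  have h2 : ∑ y ∈ Finset.Icc b (b - 1), (if b = y then 1 else 2) * pvPt N b y = 0 := by
    rw [Finset.Icc_eq_empty (by omega), Finset.sum_empty]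
  rw [h2, add_zero]

lemma pvW_eq {N a b : Int} (h0 : 0 ≤ a) (hab : a ≤ b) (hs : a * a + b * b = N) :
    pvW N a b = (if a = b then 1 else 2) * pvPt N a b + pvW N (a + 1) (b - 1) := by
  unfold pvW
  rw [sum_Icc_left hab]
  congr 1
  · apply Finset.sum_eq_single_of_mem b (Finset.mem_Icc.2 ⟨hab, le_refl b⟩)
    intro y hy hne
    rw [Finset.mem_Icc] at hy
    have hpt : pvPt N a y = 0 := by
      unfold pvPt
      rw [if_neg]
      intro hEq
      have hyy : y * y = b * b := by linarith
      rcases mul_self_eq_mul_self_iff.1 hyy with h' | h'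
      · exact hne h'
      · exact hne (by omega)
    rw [hpt, mul_zero]
  · have step1 : ∀ x ∈ Finset.Icc (a + 1) b,
        ∑ y ∈ Finset.Icc x b, (if x = y then 1 else 2) * pvPt N x y
          = ∑ y ∈ Finset.Icc x (b - 1), (if x = y then 1 else 2) * pvPt N x y := by
      intro x hx
      rw [Finset.mem_Icc] at hx
      rw [sum_Icc_right hx.2]
      have hpt : pvPt N x b = 0 := by
        unfold pvPt
        rw [if_neg]
        intro hEq
        have hxx : x * x = a * a := by linarith
        rcases mul_self_eq_mul_self_iff.1 hxx with h' | h' <;> omega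
      rw [hpt, mul_zero, add_zero]
    rw [Finset.sum_congr rfl step1]
    by_cases hb : a + 1 ≤ b
    · rw [sum_Icc_right hb]
      have h2 : ∑ y ∈ Finset.Icc b (b - 1), (if b = y then 1 else 2) * pvPt N b y = 0 := by
        rw [Finset.Icc_eq_empty (by omega), Finset.sum_empty]
      rw [h2, add_zero]
    · rw [Finset.Icc_eq_empty (by omega),
        Finset.Icc_eq_empty (show ¬ (a + 1 ≤ b - 1) by omega)]

lemma csrLoop_spec (N : Int) :
    ∀ (k : Nat) (a b c : Int), 0 ≤ a → (b + 1 - a).toNat ≤ k →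
      csrLoop N a b c = c + pvW N a b := by
  intro k
  induction k with
  | zero =>
    intro a b c h0 hk
    rw [csrLoop, dif_neg (by omega), pvW_empty (by omega), add_zero]
  | succ k ih =>
    intro a b c h0 hk
    by_cases hab : a ≤ b
    · rcases lt_trichotomy (a * a + b * b) N with hlt | heq | hgt
      · rw [csrLoop, dif_pos hab, if_neg (ne_of_lt hlt), if_pos hlt,
          ih _ _ _ (by omega) (by omega), pvW_lt h0 hab hlt]
      · have hpt : pvPt N a b = (if a = 0 then (1 : Int) else 2) * (if b = 0 then 1 else 2) := by
          unfold pvPt; rw [if_pos heq]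
        rw [csrLoop, dif_pos hab, if_pos heq, ih _ _ _ (by omega) (by omega),
          pvW_eq h0 hab heq, hpt]
        by_cases hd : a = b
        · rw [if_pos hd, if_pos hd]; ring
        · rw [if_neg hd, if_neg hd]; ring
      · rw [csrLoop, dif_pos hab, if_neg (ne_of_gt hgt), if_neg (not_lt.2 (le_of_lt hgt)),
          ih _ _ _ h0 (by omega), pvW_gt h0 hab hgt]
    · rw [csrLoop, dif_neg hab, pvW_empty (by omega), add_zero]

-- ============ A side ============

def pvR (N : Int) : Int := (Nat.sqrt N.toNat : Int)

-- the contribution of one value of a in A's loop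
def pvGA (N x : Int) : Int :=
  if N - x * x < 0 then 0
  else if (Nat.sqrt (N - x * x).toNat : Int) * (Nat.sqrt (N - x * x).toNat : Int) = N - x * x
    then (if (Nat.sqrt (N - x * x).toNat : Int) = 0 then 1 else 2) else 0

def pvEY (N x y : Int) : Int :=
  if x * x + y * y = N then (if y = 0 then 1 else 2) else 0

lemma pvR_nonneg (N : Int) : 0 ≤ pvR N := by unfold pvR; positivity

lemma pvR_sq_le (N : Int) (hN : 0 ≤ N) : pvR N * pvR N ≤ N := by
  unfold pvR
  have h2 : ((Nat.sqrt N.toNat * Nat.sqrt N.toNat : Nat) : Int) ≤ ((N.toNat : Nat) : Int) := by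
    exact_mod_cast Nat.sqrt_le N.toNat
  push_cast at h2
  omega

lemma sum_map_pyRange_Icc (f : Int → Int) (a b : Int) :
    ((PySem.List.pyRange a (b + 1) 1).map f).sum = ∑ x ∈ Finset.Icc a b, f x := by
  generalize h : (b + 1 - a).toNat = n
  induction n generalizing a with
  | zero =>
    rw [PySem.List.pyRange_one_eq_nil (by omega), Finset.Icc_eq_empty (by omega)]
    simp
  | succ n ih =>
    rw [PySem.List.pyRange_one_cons (by omega), List.map_cons, List.sum_cons,
      sum_Icc_left (by omega : a ≤ b), ih (a + 1) (by omega)]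

lemma A_eq_sum (N : Int) :
    count_signed_representations N = ∑ x ∈ Finset.Icc (-(pvR N)) (pvR N), pvGA N x := by
  unfold count_signed_representations
  have hfun : (fun (count a : Int) =>
      let b_sq := N - a * a
      if b_sq < 0 then count
      else
        let b : Int := (Nat.sqrt b_sq.toNat : Int)
        if b * b = b_sq then count + (if b = 0 then 1 else 2) else count)
      = fun (count a : Int) => count + pvGA N a := by
    funext c a
    dsimp only
    unfold pvGA
    split_ifs <;> simp
  rw [hfun, PySem.List.foldl_add, zero_add]
  exact sum_map_pyRange_Icc (pvGA N) (-(pvR N)) (pvR N)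

lemma sum_Icc_neg (f : Int → Int) (a b : Int) :
    ∑ x ∈ Finset.Icc a b, f (-x) = ∑ x ∈ Finset.Icc (-b) (-a), f x := by
  apply Finset.sum_nbij' (i := fun x => -x) (j := fun x => -x) <;>
    simp [Finset.mem_Icc] <;> omega

lemma sum_Icc_reflect (f : Int → Int) (hf : ∀ x, f (-x) = f x) {r : Int} (hr : 0 ≤ r) :
    ∑ x ∈ Finset.Icc (-r) r, f x
      = ∑ x ∈ Finset.Icc 0 r, f x + ∑ x ∈ Finset.Icc 1 r, f x := by
  have hsplit : Finset.Icc (-r) r = Finset.Icc (-r) (-1) ∪ Finset.Icc 0 r := by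
    ext z; simp only [Finset.mem_Icc, Finset.mem_union]; omega
  have hdisj : Disjoint (Finset.Icc (-r) (-1)) (Finset.Icc 0 r) := by
    rw [Finset.disjoint_left]
    intro z hz1 hz2
    rw [Finset.mem_Icc] at hz1 hz2
    omega
  rw [hsplit, Finset.sum_union hdisj, add_comm]
  congr 1
  rw [← sum_Icc_neg f 1 r]
  apply Finset.sum_congr rfl
  intro x _
  exact hf x

lemma pvGA_eq (N : Int) (hN : 0 ≤ N) (x : Int) (hx0 : 0 ≤ x) (hxr : x ≤ pvR N) :
    pvGA N x = ∑ y ∈ Finset.Icc 0 (pvR N), pvEY N x y := by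
  have hxx : x * x ≤ pvR N * pvR N := mul_le_mul hxr hxr hx0 (pvR_nonneg N)
  have ht : 0 ≤ N - x * x := by have := pvR_sq_le N hN; linarith
  unfold pvGA
  rw [if_neg (not_lt.2 ht)]
  by_cases hsq : (Nat.sqrt (N - x * x).toNat : Int) * (Nat.sqrt (N - x * x).toNat : Int) = N - x * x
  · rw [if_pos hsq]
    have hb0 : (0 : Int) ≤ (Nat.sqrt (N - x * x).toNat : Int) := by positivity
    have hbr : (Nat.sqrt (N - x * x).toNat : Int) ≤ pvR N := by
      unfold pvR
      exact_mod_cast Nat.sqrt_le_sqrt (by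
        have hx2 : 0 ≤ x * x := mul_self_nonneg x
        omega : (N - x * x).toNat ≤ N.toNat)
    have hone : ∑ y ∈ Finset.Icc 0 (pvR N), pvEY N x y
        = pvEY N x (Nat.sqrt (N - x * x).toNat : Int) := by
      apply Finset.sum_eq_single_of_mem _ (Finset.mem_Icc.2 ⟨hb0, hbr⟩)
      intro y hy hne
      rw [Finset.mem_Icc] at hy
      unfold pvEY
      rw [if_neg]
      intro hEq
      have hyy : y * y = (Nat.sqrt (N - x * x).toNat : Int) * (Nat.sqrt (N - x * x).toNat : Int) := by
        linarith
      rcases mul_self_eq_mul_self_iff.1 hyy with h' | h'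
      · exact hne h'
      · exact hne (by omega)
    rw [hone]
    unfold pvEY
    symm
    rw [if_pos (show x * x + (Nat.sqrt (N - x * x).toNat : Int) * (Nat.sqrt (N - x * x).toNat : Int) = N by linarith)]
  · rw [if_neg hsq]
    symm
    apply Finset.sum_eq_zero
    intro y hy
    rw [Finset.mem_Icc] at hy
    unfold pvEY
    rw [if_neg]
    intro hEq
    have hyy : y * y = N - x * x := by linarith
    have hyn : ((y.toNat : Int)) = y := Int.toNat_of_nonneg hy.1
    have htn : (N - x * x).toNat = y.toNat * y.toNat := by
      have hc : ((y.toNat * y.toNat : Nat) : Int) = N - x * x := by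
        push_cast
        rw [hyn]
        linarith
      omega
    apply hsq
    rw [htn, Nat.sqrt_eq]
    rw [hyn]
    linarith

lemma A_eq_double (N : Int) (hN : 0 ≤ N) :
    count_signed_representations N
      = ∑ x ∈ Finset.Icc 0 (pvR N), ∑ y ∈ Finset.Icc 0 (pvR N), pvPt N x y := by
  rw [A_eq_sum,
    sum_Icc_reflect (pvGA N) (fun x => by unfold pvGA; rw [neg_mul_neg]) (pvR_nonneg N)]
  have hga : ∀ x ∈ Finset.Icc (0:Int) (pvR N),
      pvGA N x = ∑ y ∈ Finset.Icc 0 (pvR N), pvEY N x y := by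
    intro x hx
    rw [Finset.mem_Icc] at hx
    exact pvGA_eq N hN x hx.1 hx.2
  have hga1 : ∀ x ∈ Finset.Icc (1:Int) (pvR N),
      pvGA N x = ∑ y ∈ Finset.Icc 0 (pvR N), pvEY N x y := by
    intro x hx
    rw [Finset.mem_Icc] at hx
    exact pvGA_eq N hN x (by omega) hx.2
  rw [Finset.sum_congr rfl hga, Finset.sum_congr rfl hga1]
  have hpt : ∀ x ∈ Finset.Icc (0:Int) (pvR N),
      ∑ y ∈ Finset.Icc 0 (pvR N), pvPt N x y
        = (if x = 0 then 1 else 2) * ∑ y ∈ Finset.Icc 0 (pvR N), pvEY N x y := by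
    intro x _
    rw [Finset.mul_sum]
    apply Finset.sum_congr rfl
    intro y _
    unfold pvPt pvEY
    split_ifs <;> ring
  have key : ∀ g : Int → Int, ∑ x ∈ Finset.Icc 0 (pvR N), (if x = 0 then 1 else 2) * g x
      = ∑ x ∈ Finset.Icc 0 (pvR N), g x + ∑ x ∈ Finset.Icc 1 (pvR N), g x := by
    intro g
    rw [sum_Icc_left (pvR_nonneg N), sum_Icc_left (pvR_nonneg N), if_pos rfl]
    have h2 : ∑ x ∈ Finset.Icc (0+1:Int) (pvR N), (if x = 0 then 1 else 2) * g x
        = ∑ x ∈ Finset.Icc (0+1:Int) (pvR N), (g x + g x) := by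
      apply Finset.sum_congr rfl
      intro x hx
      rw [Finset.mem_Icc] at hx
      rw [if_neg (by omega)]
      ring
    rw [h2, Finset.sum_add_distrib]
    norm_num
    ring
  rw [Finset.sum_congr rfl hpt, key (fun x => ∑ y ∈ Finset.Icc 0 (pvR N), pvEY N x y)]

lemma sum_sym (r : Int) (f : Int → Int → Int) (hf : ∀ x y, f x y = f y x) :
    ∑ x ∈ Finset.Icc 0 r, ∑ y ∈ Finset.Icc 0 r, f x y
      = ∑ x ∈ Finset.Icc 0 r, ∑ y ∈ Finset.Icc x r, (if x = y then 1 else 2) * f x y := by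
  have hsplit : ∀ x ∈ Finset.Icc (0:Int) r, ∑ y ∈ Finset.Icc 0 r, f x y
      = (∑ y ∈ Finset.Icc 0 (x - 1), f x y) + ∑ y ∈ Finset.Icc x r, f x y := by
    intro x hx
    rw [Finset.mem_Icc] at hx
    have hu : Finset.Icc (0:Int) r = Finset.Icc 0 (x - 1) ∪ Finset.Icc x r := by
      ext z; simp only [Finset.mem_Icc, Finset.mem_union]; omega
    rw [hu, Finset.sum_union (by
      rw [Finset.disjoint_left]
      intro z h1 h2
      rw [Finset.mem_Icc] at h1 h2
      omega)]
  rw [Finset.sum_congr rfl hsplit, Finset.sum_add_distrib]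
  have hT1 : ∑ x ∈ Finset.Icc (0:Int) r, ∑ y ∈ Finset.Icc 0 (x - 1), f x y
      = ∑ x ∈ Finset.Icc (0:Int) r, ∑ y ∈ Finset.Icc (x + 1) r, f x y := by
    have e1 : ∀ x ∈ Finset.Icc (0:Int) r, ∑ y ∈ Finset.Icc 0 (x - 1), f x y
        = ∑ y ∈ Finset.Icc 0 r, if y < x then f x y else 0 := by
      intro x hx
      rw [Finset.mem_Icc] at hx
      rw [← Finset.sum_filter]
      congr 1
      ext z; simp only [Finset.mem_filter, Finset.mem_Icc]; omega
    have e2 : ∀ x ∈ Finset.Icc (0:Int) r, ∑ y ∈ Finset.Icc (x + 1) r, f x y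
        = ∑ y ∈ Finset.Icc 0 r, if x < y then f x y else 0 := by
      intro x hx
      rw [Finset.mem_Icc] at hx
      rw [← Finset.sum_filter]
      congr 1
      ext z; simp only [Finset.mem_filter, Finset.mem_Icc]; omega
    rw [Finset.sum_congr rfl e1, Finset.sum_congr rfl e2, Finset.sum_comm]
    apply Finset.sum_congr rfl
    intro y _
    apply Finset.sum_congr rfl
    intro x _
    split_ifs with h
    · exact hf x y
    · rfl
  rw [hT1, ← Finset.sum_add_distrib]
  apply Finset.sum_congr rfl
  intro x hx
  rw [Finset.mem_Icc] at hx
  rw [sum_Icc_left hx.2, sum_Icc_left hx.2]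
  have h2 : ∑ y ∈ Finset.Icc (x + 1) r, (if x = y then 1 else 2) * f x y
      = ∑ y ∈ Finset.Icc (x + 1) r, (f x y + f x y) := by
    apply Finset.sum_congr rfl
    intro y hy
    rw [Finset.mem_Icc] at hy
    rw [if_neg (by omega)]
    ring
  rw [h2, Finset.sum_add_distrib, if_pos rfl]
  ring

-- ===== VERDICT (by name: the statement is the Claim_ definition above) =====
theorem count_signed_representations_spec : Claim_equal_count_signed_representations := by
  unfold Claim_equal_count_signed_representations
  intro N _hD hPre
  have hN : (0:Int) ≤ N := hPre
  unfold Spec_count_signed_representations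
  rw [A_eq_double N hN, sum_sym (pvR N) (pvPt N) (pvPt_symm N)]
  have hW : ∑ x ∈ Finset.Icc 0 (pvR N), ∑ y ∈ Finset.Icc x (pvR N),
      (if x = y then 1 else 2) * pvPt N x y = pvW N 0 (pvR N) := rfl
  rw [hW]
  unfold count_signed_representations_alt
  unfold pvR
  rw [csrLoop_spec N (((Nat.sqrt N.toNat : Int) + 1).toNat) 0 (Nat.sqrt N.toNat : Int) 0 le_rfl
    (by omega), zero_add]
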